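-- pv_equiv track=rewrite | github.com/Pomau/leetcode-solved | 2640-find-the-score-of-all-prefixes-of-an-array/2640-find-the-score-of-all-prefixes-of-an-array.py | findPrefixScore
-- ===== SOURCE A (Python) =====
-- from typing import List
--
-- def findPrefixScore(nums: List[int]) -> List[int]:
--     prefix = []
--     maxn = 0
--     for i in range(len(nums)):
--         maxn = max(maxn, nums[i])
--         prefix.append(nums[i] + maxn)
--     ans = []
--     sums = 0
--     for i in range(len(nums)):
--         sums += prefix[i]
--         ans.append(sums)
--     return ans
-- ===== SOURCE B (Python) =====
-- def findPrefixScore(nums):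
--     n = len(nums)
--     # prefix sums of the elements alone
--     ps = []
--     t = 0
--     for x in nums:
--         t += x
--         ps.append(t)
--     # "record" positions: indices where the running max strictly increases
--     recs = []
--     m = 0
--     for i, x in enumerate(nums):
--         if x > m:
--             m = x
--             recs.append((i, x))
--     bounds = [i for i, _ in recs] + [n]
--     # cumulative running-max contribution: zeros before the first record, then
--     # one arithmetic progression per record segment (the max is constant there)
--     ms = [0] * bounds[0]
--     base = 0
--     for (i, v), nxt in zip(recs, bounds[1:]):
--         ms.extend(base + (j + 1) * v for j in range(nxt - i))
--         base += (nxt - i) * v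
--     return [p + q for p, q in zip(ps, ms)]
-- ===== Notes on version B (the rewrite author's own statement) =====
-- stated objective: alternative
-- what changed: Instead of materialising per-element nums[i]+runmax and cumsumming it, B splits the answer by linearity into the prefix sums of nums plus the cumulative running-max contribution, which it generates segment-by-segment from the list of record positions (indices where the running max strictly increases) as arithmetic progressions, then zips the two arrays.
import Mathlib
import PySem

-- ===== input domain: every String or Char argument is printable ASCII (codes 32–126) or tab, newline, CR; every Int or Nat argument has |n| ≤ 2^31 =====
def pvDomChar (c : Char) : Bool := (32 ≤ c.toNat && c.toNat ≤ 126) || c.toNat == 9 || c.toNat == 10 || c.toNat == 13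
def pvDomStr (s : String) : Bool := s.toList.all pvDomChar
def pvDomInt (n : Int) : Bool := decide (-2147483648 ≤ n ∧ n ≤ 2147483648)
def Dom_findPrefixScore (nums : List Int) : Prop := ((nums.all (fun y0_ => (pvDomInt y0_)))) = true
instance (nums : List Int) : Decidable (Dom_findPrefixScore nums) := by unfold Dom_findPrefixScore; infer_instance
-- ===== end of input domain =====

-- B computes the answer as prefix sums of nums plus a segment-wise (per record of the
-- running max) arithmetic-progression generation of the cumulative running-max sums,
-- instead of A's per-element prefix list followed by a cumulative-sum pass.

-- ===== PORT A =====
def findPrefixScore (nums : List Int) : List Int :=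
  -- first loop: prefix = [], maxn = 0; append nums[i] + maxn
  let pm := nums.foldl (fun (s : List Int × Int) x =>
    (s.1 ++ [x + max s.2 x], max s.2 x)) ([], 0)
  -- second loop: ans = [], sums = 0
  let as := pm.1.foldl (fun (st : List Int × Int) p =>
    (st.1 ++ [st.2 + p], st.2 + p)) ([], 0)
  as.1

-- ===== PORT B =====
def findPrefixScore_alt (nums : List Int) : List Int :=
  let n : Int := nums.length
  -- prefix sums of the elements alone
  let ps := (nums.foldl (fun (st : List Int × Int) p =>
    (st.1 ++ [st.2 + p], st.2 + p)) ([], 0)).1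
  -- record positions: (i, x) where the running max strictly increases
  let recs := ((PySem.List.enumerate nums 0).foldl
      (fun (st : Int × List (Int × Int)) p =>
        if p.2 > st.1 then (p.2, st.2 ++ [(p.1, p.2)]) else st) (0, [])).2
  let bounds := recs.map (fun r => r.1) ++ [n]
  -- ms = [0] * bounds[0]  (bounds[0] is a nonnegative index, so .toNat is exact)
  let ms0 : List Int := List.replicate ((bounds.getD 0 0).toNat) 0
  -- per-segment emission over zip(recs, bounds[1:]); range(nxt - i) has nxt ≥ i, so .toNat is exact
  let fin := (recs.zip (bounds.drop 1)).foldl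
      (fun (st : List Int × Int) q =>
        (st.1 ++ (List.range (q.2 - q.1.1).toNat).map (fun (j : Nat) => st.2 + ((j : Int) + 1) * q.1.2),
         st.2 + (q.2 - q.1.1) * q.1.2)) (ms0, 0)
  List.zipWith (· + ·) ps fin.1

-- ===== PRECONDITION & SPEC =====
def Spec_findPrefixScore (nums : List Int) (out : List Int) : Prop := out = findPrefixScore_alt nums
instance (nums : List Int) (out : List Int) : Decidable (Spec_findPrefixScore nums out) := by unfold Spec_findPrefixScore; infer_instance

-- ===== CLAIM (what is proved, stated in full; the proofs are below) =====
def Claim_equal_findPrefixScore : Prop := ∀ (nums : List Int), Dom_findPrefixScore nums → Spec_findPrefixScore nums (findPrefixScore nums)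

-- ===== LEMMAS AND PROOFS =====

-- A's first loop, head-first
def pref1 : List Int → Int → List Int
  | [], _ => []
  | x :: xs, m => (x + max m x) :: pref1 xs (max m x)

-- cumulative sums, head-first (A's second loop; also B's ps loop)
def psum : List Int → Int → List Int
  | [], _ => []
  | p :: ps, s => (s + p) :: psum ps (s + p)

-- the fused reference computation
def fused : List Int → Int → Int → List Int
  | [], _, _ => []
  | x :: xs, m, s =>
    (s + x + (if x > m then x else m)) :: fused xs (if x > m then x else m) (s + x + (if x > m then x else m))

-- cumulative running-max sums, head-first
def cmL : List Int → Int → Int → List Int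
  | [], _, _ => []
  | x :: xs, m, b =>
    (b + (if x > m then x else m)) :: cmL xs (if x > m then x else m) (b + (if x > m then x else m))

-- record list of nums w.r.t. current max m, indices from i
def recsR : List Int → Int → Int → List (Int × Int)
  | [], _, _ => []
  | x :: xs, m, i => if x > m then (i, x) :: recsR xs x (i + 1) else recsR xs m (i + 1)

-- arithmetic progression b+v, b+2v, …, k terms
def cmLconst : Nat → Int → Int → List Int
  | 0, _, _ => []
  | k + 1, v, b => (b + v) :: cmLconst k v (b + v)

-- spec-side segmented emission: gap with max m from position p, then the records
def emitFull : List (Int × Int) → Int → Int → Int → Int → List Int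
  | [], n, p, m, b => cmLconst (n - p).toNat m b
  | (i, v) :: rest, n, p, m, b => cmLconst (i - p).toNat m b ++ emitFull rest n i v (b + (i - p) * m)

-- B-side segmented emission (each record paired with the next boundary)
def emitB : List (Int × Int) → Int → Int → List Int
  | [], _, _ => []
  | (i, v) :: rest, n, b =>
    cmLconst ((match rest with | [] => n | (j, _) :: _ => j) - i).toNat v b ++
      emitB rest n (b + ((match rest with | [] => n | (j, _) :: _ => j) - i) * v)

-- the zipped list recs.zip(bounds[1:]), head-first
def zl : List (Int × Int) → Int → List ((Int × Int) × Int)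
  | [], _ => []
  | (i, v) :: rest, n => ((i, v), match rest with | [] => n | (j, _) :: _ => j) :: zl rest n

theorem fold1_eq (nums : List Int) (acc : List Int) (m : Int) :
    nums.foldl (fun (s : List Int × Int) x =>
      (s.1 ++ [x + max s.2 x], max s.2 x)) (acc, m) = (acc ++ pref1 nums m, nums.foldl max m) := by
  induction nums generalizing acc m with
  | nil => simp [pref1]
  | cons x xs ih => simp [pref1, List.foldl, ih]

theorem fold2_eq (ps : List Int) (acc : List Int) (s : Int) :
    ps.foldl (fun (st : List Int × Int) p =>
      (st.1 ++ [st.2 + p], st.2 + p)) (acc, s) = (acc ++ psum ps s, ps.foldl (· + ·) s) := by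
  induction ps generalizing acc s with
  | nil => simp [psum]
  | cons p ps ih => simp [psum, List.foldl, ih]

theorem psum_pref1 (nums : List Int) (m s : Int) :
    psum (pref1 nums m) s = fused nums m s := by
  induction nums generalizing m s with
  | nil => rfl
  | cons x xs ih =>
    have hmax : max m x = if x > m then x else m := by
      simp only [max_def]; split_ifs <;> omega
    have hassoc : s + (x + (if x > m then x else m)) = s + x + (if x > m then x else m) := by ring
    simp only [pref1, psum, hmax, fused, hassoc, ih]

theorem fused_eq_zip (nums : List Int) (m a c : Int) :
    fused nums m (a + c) = List.zipWith (· + ·) (psum nums a) (cmL nums m c) := by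
  induction nums generalizing m a c with
  | nil => rfl
  | cons x xs ih =>
    simp only [fused, psum, cmL, List.zipWith]
    have h : a + c + x + (if x > m then x else m)
        = (a + x) + (c + (if x > m then x else m)) := by ring
    rw [h, ih]

theorem recs_fold (nums : List Int) (m i : Int) (acc : List (Int × Int)) :
    (((PySem.List.enumerate nums i).foldl
      (fun (st : Int × List (Int × Int)) p =>
        if p.2 > st.1 then (p.2, st.2 ++ [(p.1, p.2)]) else st) (m, acc))).2
    = acc ++ recsR nums m i := by
  induction nums generalizing m i acc with
  | nil => simp [recsR, PySem.List.enumerate_nil]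
  | cons x xs ih =>
    rw [PySem.List.enumerate_cons]
    simp only [List.foldl, recsR]
    by_cases h : x > m
    · simp [h, ih]
    · simp [h, ih]

theorem recsR_ge (nums : List Int) (m i : Int) :
    ∀ q ∈ recsR nums m i, i ≤ q.1 := by
  induction nums generalizing m i with
  | nil => simp [recsR]
  | cons x xs ih =>
    intro q hq
    simp only [recsR] at hq
    split_ifs at hq with h
    · rcases List.mem_cons.mp hq with rfl | hq
      · exact le_refl _
      · exact le_trans (by omega) (ih x (i + 1) q hq)
    · exact le_trans (by omega) (ih m (i + 1) q hq)

theorem range_map_eq_cmLconst (k : Nat) (v b : Int) :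
    (List.range k).map (fun (j : Nat) => b + ((j : Int) + 1) * v) = cmLconst k v b := by
  induction k generalizing b with
  | zero => rfl
  | succ k ih =>
    rw [List.range_succ_eq_map]
    simp only [List.map_cons, List.map_map, cmLconst, Nat.cast_zero]
    congr 1
    · norm_num
    · rw [← ih (b + v)]
      apply List.map_congr_left
      intro j _
      simp only [Function.comp_apply]
      push_cast
      ring

theorem cmLconst_zero (k : Nat) (b : Int) :
    cmLconst k 0 b = List.replicate k b := by
  induction k generalizing b with
  | zero => rfl
  | succ k ih => simp [cmLconst, List.replicate, ih]

theorem emitFull_step (R : List (Int × Int)) (n p m b : Int)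
    (hR : ∀ q ∈ R, p < q.1) (hn : R = [] → p < n) :
    emitFull R n p m b = (b + m) :: emitFull R n (p + 1) m (b + m) := by
  match R with
  | [] =>
    have hpn : p < n := hn rfl
    have ht : (n - p).toNat = (n - (p + 1)).toNat + 1 := by omega
    simp [emitFull, ht, cmLconst]
  | (i, v) :: rest =>
    have hpi : p < i := hR (i, v) (List.mem_cons_self)
    have ht : (i - p).toNat = (i - (p + 1)).toNat + 1 := by omega
    have hb : b + (i - p) * m = (b + m) + (i - (p + 1)) * m := by ring
    simp [emitFull, ht, cmLconst, hb]

theorem key_emit (nums : List Int) (m b p : Int) :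
    emitFull (recsR nums m p) (p + (nums.length : Int)) p m b = cmL nums m b := by
  induction nums generalizing m b p with
  | nil => simp [recsR, emitFull, cmL, cmLconst]
  | cons x xs ih =>
    have hn : p + (((x :: xs).length : Nat) : Int) = (p + 1) + (xs.length : Int) := by
      push_cast [List.length_cons]; ring
    rw [hn]
    simp only [recsR, cmL]
    by_cases h : x > m
    · simp only [if_pos h]
      rw [show emitFull ((p, x) :: recsR xs x (p + 1)) ((p + 1) + (xs.length : Int)) p m b
            = emitFull (recsR xs x (p + 1)) ((p + 1) + (xs.length : Int)) p x b by
          simp [emitFull, cmLconst]]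
      rw [emitFull_step _ _ _ _ _
          (fun q hq => lt_of_lt_of_le (by omega) (recsR_ge xs x (p + 1) q hq))
          (fun _ => by omega)]
      rw [ih]
    · simp only [if_neg h]
      rw [emitFull_step _ _ _ _ _
          (fun q hq => lt_of_lt_of_le (by omega) (recsR_ge xs m (p + 1) q hq))
          (fun _ => by omega)]
      rw [ih]

theorem zip_shape (recs : List (Int × Int)) (n : Int) :
    recs.zip ((recs.map (fun r => r.1) ++ [n]).drop 1) = zl recs n := by
  induction recs with
  | nil => rfl
  | cons hd rest ih =>
    obtain ⟨i, v⟩ := hd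
    match rest with
    | [] => rfl
    | (j, w) :: r' =>
      simp only [List.map_cons, List.cons_append, List.drop_succ_cons, List.drop_zero] at ih
      simp only [zl, List.map_cons, List.cons_append, List.drop_succ_cons, List.drop_zero,
        List.zip_cons_cons]
      rw [ih]
      simp [zl]

theorem foldEmit (recs : List (Int × Int)) (n : Int) (acc : List Int) (b : Int) :
    ((zl recs n).foldl
      (fun (st : List Int × Int) q =>
        (st.1 ++ (List.range (q.2 - q.1.1).toNat).map (fun (j : Nat) => st.2 + ((j : Int) + 1) * q.1.2),
         st.2 + (q.2 - q.1.1) * q.1.2)) (acc, b)).1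
    = acc ++ emitB recs n b := by
  induction recs generalizing acc b with
  | nil => simp [zl, emitB]
  | cons hd rest ih =>
    obtain ⟨i, v⟩ := hd
    simp only [zl, List.foldl, emitB]
    rw [ih, range_map_eq_cmLconst, List.append_assoc]

theorem emitB_eq (rest : List (Int × Int)) (i v b n : Int) :
    emitB ((i, v) :: rest) n b = emitFull rest n i v b := by
  induction rest generalizing i v b with
  | nil => simp [emitB, emitFull]
  | cons hd r' ih =>
    obtain ⟨j, w⟩ := hd
    simp only [emitB, emitFull] at *
    rw [ih]

theorem alt_eq_fused (nums : List Int) :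
    findPrefixScore_alt nums = fused nums 0 0 := by
  simp only [findPrefixScore_alt, recs_fold, List.nil_append, fold2_eq, zip_shape, foldEmit]
  have hkey := key_emit nums 0 0 0
  rw [zero_add] at hkey
  have hms : List.replicate (((recsR nums 0 0).map (fun r => r.1) ++ [(nums.length : Int)]).getD 0 0).toNat (0 : Int)
      ++ emitB (recsR nums 0 0) (nums.length : Int) 0 = cmL nums 0 0 := by
    rw [← hkey]
    match hrec : recsR nums 0 0 with
    | [] => simp [emitB, emitFull, cmLconst_zero]
    | (i, v) :: rest =>
      rw [emitB_eq]
      simp [emitFull, cmLconst_zero]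
  rw [hms]
  have hz := fused_eq_zip nums 0 0 0
  rw [zero_add] at hz
  exact hz.symm

theorem findPrefixScore_spec : Claim_equal_findPrefixScore := by
  intro nums _
  show findPrefixScore nums = findPrefixScore_alt nums
  simp only [findPrefixScore, fold1_eq, fold2_eq, List.nil_append]
  rw [psum_pref1, alt_eq_fused]

-- ===== VERDICT (by name: the statement is the Claim_ definition above) =====
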